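-- pv_equiv track=rewrite | github.com/SecSamDev/cancamusa | lib/scripter/rol_selector.py | roles_from_extracted_info
-- ===== SOURCE A (Python) =====
-- ROLE_DOMAIN_CONTROLLER = 'DC'
--
-- ROLE_WEB_SERVER = 'Web Server'
--
-- ROLE_AD_FOREST = 'AD Forest'
--
-- ROLE_DHCP = 'DHCP'
--
-- ROLE_DNS = 'DNS'
--
-- ROLE_KMS = 'KMS'
--
-- def roles_from_extracted_info(roles):
--     returned_roles = []
--     detected_roles = set()
--     for rol in roles:
--         if 'Name' in rol:
--             detected_roles.add(rol['Name'])
--             if rol['Name'] == 'DHCP':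
--                 returned_roles.append(ROLE_DHCP)
--             elif rol['Name'] == 'DNS':
--                 returned_roles.append(ROLE_DNS)
--             elif rol['Name'] == 'Web-Server':
--                 returned_roles.append(ROLE_WEB_SERVER)
--             elif rol['Name'] == 'Web-Server':
--                 returned_roles.append(ROLE_WEB_SERVER)
--             elif rol['Name'] == 'VolumeActivation':
--                 returned_roles.append(ROLE_KMS)
--
--     if 'AD-Domain-Services' in detected_roles:
--         if 'RSAT-AD-AdminCenter' in detected_roles:
--             returned_roles.append(ROLE_DOMAIN_CONTROLLER)
--         else:
--             returned_roles.append(ROLE_AD_FOREST)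
--
--
--     return list(set(returned_roles))
-- ===== SOURCE B (Python) =====
-- ROLE_TRIGGERS = [
--     ('DHCP', 'DHCP'),
--     ('DNS', 'DNS'),
--     ('Web-Server', 'Web Server'),
--     ('VolumeActivation', 'KMS'),
-- ]
--
-- def roles_from_extracted_info(roles):
--     detected_roles = {rol['Name'] for rol in roles if 'Name' in rol}
--     result_set = {role for trigger, role in ROLE_TRIGGERS if trigger in detected_roles}
--     if 'AD-Domain-Services' in detected_roles:
--         result_set.add('DC' if 'RSAT-AD-AdminCenter' in detected_roles else 'AD Forest')
--     return list(result_set)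
-- ===== Notes on version B (the rewrite author's own statement) =====
-- stated objective: simpler
-- what changed: B inverts the loop: it collects the detected-name set in one pass, then derives the result set by iterating over a fixed four-entry trigger-to-role table and testing membership in that set, instead of A's per-element if/elif chain interleaved with set bookkeeping.
import Mathlib
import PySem

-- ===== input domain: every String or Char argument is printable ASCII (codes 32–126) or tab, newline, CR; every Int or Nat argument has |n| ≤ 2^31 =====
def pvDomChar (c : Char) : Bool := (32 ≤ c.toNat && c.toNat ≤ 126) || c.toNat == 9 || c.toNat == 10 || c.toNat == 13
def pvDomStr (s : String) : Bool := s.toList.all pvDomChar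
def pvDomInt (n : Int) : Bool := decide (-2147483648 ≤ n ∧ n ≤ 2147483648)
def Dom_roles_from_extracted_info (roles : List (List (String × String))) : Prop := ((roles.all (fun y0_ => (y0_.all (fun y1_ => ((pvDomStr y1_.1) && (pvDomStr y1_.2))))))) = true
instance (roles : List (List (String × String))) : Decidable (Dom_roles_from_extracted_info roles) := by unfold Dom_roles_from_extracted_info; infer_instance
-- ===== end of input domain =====

-- B inverts the loop: one pass collects the detected-name set, then the result SET is derived by
-- membership tests over a fixed trigger→role table (objective: simpler). Both Pythons end in
-- list(<set>); Python's set iteration order is not modelled, so BOTH ports materialize that final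
-- set in sorted order (the same modeling on both sides); equality is proved for that list.

-- ===== PORT A =====
def roles_from_extracted_info (roles : List (List (String × String))) : List String :=
  let st := roles.foldl
    (fun (p : List String × PySem.Set String) rol =>
      match (PySem.Dict.mk rol).get? "Name" with     -- if 'Name' in rol: … rol['Name']
      | none => p
      | some n =>
          (p.1 ++ (if n = "DHCP" then ["DHCP"]
                   else if n = "DNS" then ["DNS"]
                   else if n = "Web-Server" then ["Web Server"]
                   else if n = "Web-Server" then ["Web Server"]
                   else if n = "VolumeActivation" then ["KMS"]
                   else []),
           PySem.Set.add p.2 n))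
    ([], PySem.Set.empty)
  let returned :=
    if PySem.Set.contains st.2 "AD-Domain-Services" then
      (if PySem.Set.contains st.2 "RSAT-AD-AdminCenter" then st.1 ++ ["DC"]
       else st.1 ++ ["AD Forest"])
    else st.1
  -- list(set(returned_roles)): set iteration order is unmodelled; materialized sorted
  PySem.List.sorted (PySem.Set.ofList returned) (fun x => x) false

-- ===== PORT B =====
def pvRoleTriggers : List (String × String) :=
  [("DHCP", "DHCP"), ("DNS", "DNS"),
   ("Web-Server", "Web Server"), ("VolumeActivation", "KMS")]

def roles_from_extracted_info_alt (roles : List (List (String × String))) : List String :=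
  let detected := PySem.Set.ofList (roles.filterMap (fun rol => (PySem.Dict.mk rol).get? "Name"))
  let resultSet := PySem.Set.ofList
    ((pvRoleTriggers.filter (fun p => PySem.Set.contains detected p.1)).map (fun p => p.2))
  let resultSet :=
    if PySem.Set.contains detected "AD-Domain-Services" then
      PySem.Set.add resultSet
        (if PySem.Set.contains detected "RSAT-AD-AdminCenter" then "DC" else "AD Forest")
    else resultSet
  -- list(result_set): set iteration order is unmodelled; materialized sorted
  PySem.List.sorted resultSet (fun x => x) false

-- ===== PRECONDITION & SPEC =====
def Spec_roles_from_extracted_info (roles : List (List (String × String))) (out : List String) : Prop := out = roles_from_extracted_info_alt roles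
instance (roles : List (List (String × String))) (out : List String) : Decidable (Spec_roles_from_extracted_info roles out) := by unfold Spec_roles_from_extracted_info; infer_instance

-- ===== CLAIM =====
def Claim_equal_roles_from_extracted_info : Prop := ∀ (roles : List (List (String × String))), Dom_roles_from_extracted_info roles → Spec_roles_from_extracted_info roles (roles_from_extracted_info roles)

-- ===== LEMMAS AND PROOFS =====

-- the 0/1-element list appended by A's if/elif chain for one extracted name
def pvChain (n : String) : List String :=
  if n = "DHCP" then ["DHCP"]
  else if n = "DNS" then ["DNS"]
  else if n = "Web-Server" then ["Web Server"]
  else if n = "Web-Server" then ["Web Server"]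
  else if n = "VolumeActivation" then ["KMS"]
  else []

theorem mem_pvChain (x n : String) :
    x ∈ pvChain n ↔ ((n = "DHCP" ∧ x = "DHCP") ∨ (n = "DNS" ∧ x = "DNS") ∨
      (n = "Web-Server" ∧ x = "Web Server") ∨ (n = "VolumeActivation" ∧ x = "KMS")) := by
  unfold pvChain; split_ifs <;> simp_all

theorem pvFoldA (roles : List (List (String × String))) (acc : List String × PySem.Set String) :
    roles.foldl
      (fun (p : List String × PySem.Set String) rol =>
        match (PySem.Dict.mk rol).get? "Name" with
        | none => p
        | some n =>
            (p.1 ++ (if n = "DHCP" then ["DHCP"]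
                     else if n = "DNS" then ["DNS"]
                     else if n = "Web-Server" then ["Web Server"]
                     else if n = "Web-Server" then ["Web Server"]
                     else if n = "VolumeActivation" then ["KMS"]
                     else []),
             PySem.Set.add p.2 n)) acc
    = (acc.1 ++ (roles.filterMap (fun rol => (PySem.Dict.mk rol).get? "Name")).flatMap pvChain,
       PySem.Set.update acc.2 (roles.filterMap (fun rol => (PySem.Dict.mk rol).get? "Name"))) := by
  induction roles generalizing acc with
  | nil => simp [PySem.Set.update]
  | cons r rs ih =>
      cases h : (PySem.Dict.mk r).get? "Name" with
      | none => simp [List.foldl_cons, h, ih, PySem.Set.update]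
      | some n =>
          simp only [List.foldl_cons, h, ih, List.filterMap_cons, List.flatMap_cons]
          refine Prod.ext ?_ ?_
          · simp [pvChain, List.append_assoc]
          · simp [PySem.Set.update_cons]

theorem pvNodup_add (s : PySem.Set String) (x : String) (h : s.Nodup) :
    (PySem.Set.add s x).Nodup := by
  unfold PySem.Set.add
  split_ifs with hc
  · exact h
  · have hx : x ∉ s := by simpa using hc
    exact List.Nodup.append h (by simp) (by simpa [List.disjoint_singleton] using hx)

theorem pvMem_Bmap (d : PySem.Set String) (x : String) :
    x ∈ (pvRoleTriggers.filter (fun p => PySem.Set.contains d p.1)).map (fun p => p.2) ↔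
      ((PySem.Set.contains d "DHCP" ∧ x = "DHCP") ∨ (PySem.Set.contains d "DNS" ∧ x = "DNS") ∨
       (PySem.Set.contains d "Web-Server" ∧ x = "Web Server") ∨
       (PySem.Set.contains d "VolumeActivation" ∧ x = "KMS")) := by
  simp [pvRoleTriggers, List.filter, List.mem_map]
  by_cases h1 : PySem.Set.contains d "DHCP" <;>
  by_cases h2 : PySem.Set.contains d "DNS" <;>
  by_cases h3 : PySem.Set.contains d "Web-Server" <;>
  by_cases h4 : PySem.Set.contains d "VolumeActivation" <;>
    simp_all <;> aesop

theorem pvContains_ofList (xs : List String) (x : String) :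
    PySem.Set.contains (PySem.Set.ofList xs) x ↔ x ∈ xs := by
  by_cases h : x ∈ xs <;> simp [h]

-- ===== VERDICT =====
theorem roles_from_extracted_info_spec : Claim_equal_roles_from_extracted_info := by
  intro roles _
  unfold Spec_roles_from_extracted_info roles_from_extracted_info roles_from_extracted_info_alt
  rw [pvFoldA]
  set names := roles.filterMap (fun rol => (PySem.Dict.mk rol).get? "Name") with hnames
  have hupd : PySem.Set.update PySem.Set.empty names = PySem.Set.ofList names :=
    PySem.Set.update_nil_left names
  simp only [hupd]
  set d := PySem.Set.ofList names with hd
  -- the two final sets (before sorting) are permutations of one another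
  have hmain : ∀ (L R : List String),
      L.Nodup → R.Nodup → (∀ x, x ∈ L ↔ x ∈ R) →
      PySem.List.sorted L (fun x => x) false = PySem.List.sorted R (fun x => x) false := by
    intro L R hL hR hmem
    exact PySem.List.sorted_eq_sorted_of_perm L R (fun x => x) (fun a b h => h)
      ((List.perm_ext_iff_of_nodup hL hR).mpr hmem)
  have hflat : ∀ x, x ∈ names.flatMap pvChain ↔
      x ∈ (pvRoleTriggers.filter (fun p => PySem.Set.contains d p.1)).map (fun p => p.2) := by
    intro x
    rw [pvMem_Bmap]
    simp only [List.mem_flatMap, mem_pvChain, hd, pvContains_ofList]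
    constructor
    · rintro ⟨n, hn, (⟨rfl, rfl⟩ | ⟨rfl, rfl⟩ | ⟨rfl, rfl⟩ | ⟨rfl, rfl⟩)⟩ <;> tauto
    · rintro ((⟨h, rfl⟩ | ⟨h, rfl⟩ | ⟨h, rfl⟩ | ⟨h, rfl⟩)) <;> exact ⟨_, h, by tauto⟩
  have htail : ∀ t : String,
      PySem.List.sorted (PySem.Set.ofList (names.flatMap pvChain ++ [t])) (fun x => x) false
      = PySem.List.sorted
          (PySem.Set.add (PySem.Set.ofList
            ((pvRoleTriggers.filter (fun p => PySem.Set.contains d p.1)).map (fun p => p.2))) t)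
          (fun x => x) false := by
    intro t
    refine hmain _ _ (PySem.Set.nodup_ofList _)
      (pvNodup_add _ _ (PySem.Set.nodup_ofList _)) ?_
    intro x
    simp only [PySem.Set.mem_ofList, PySem.Set.mem_add, List.mem_append, List.mem_singleton]
    rw [hflat x]
  by_cases hAD : PySem.Set.contains d "AD-Domain-Services" = true
  · rw [if_pos hAD, if_pos hAD]
    by_cases hRS : PySem.Set.contains d "RSAT-AD-AdminCenter" = true
    · rw [if_pos hRS, if_pos hRS]
      exact htail _
    · rw [if_neg hRS, if_neg hRS]
      exact htail _
  · rw [if_neg hAD, if_neg hAD]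
    exact hmain _ _ (PySem.Set.nodup_ofList _) (PySem.Set.nodup_ofList _)
      (fun x => by simp only [PySem.Set.mem_ofList]; exact hflat x)
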